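-- pv_equiv track=rewrite | github.com/nuclia/nucliadb | nucliadb/src/nucliadb/ingest/orm/utils.py | choose_matryoshka_dimension
-- ===== SOURCE A (Python) =====
-- from typing import Sequence
--
-- def choose_matryoshka_dimension(dimensions: Sequence[int]) -> int:
--     """Given a list of matryoshka embedding available dimensions, choose one to
--     set the vector dimension.
--     """
--     if len(dimensions) == 0:
--         raise ValueError("Can't choose matryoshka dimension from an empty list")
--
--     threshold = 2000
--     previous = None
--     for dimension in sorted(dimensions):
--         if dimension > threshold:
--             break
--         previous = dimension
--
--     if dimension > threshold:
--         if previous is None: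
--             return dimension
--         else:
--             return previous
--     return dimension
-- ===== SOURCE B (Python) =====
-- def choose_matryoshka_dimension(dimensions):
--     """Given a list of matryoshka embedding available dimensions, choose one to
--     set the vector dimension.
--     """
--     if len(dimensions) == 0:
--         raise ValueError("Can't choose matryoshka dimension from an empty list")
--
--     threshold = 2000
--     valid = [d for d in dimensions if d <= threshold]
--     return max(valid) if valid else min(dimensions)
-- ===== Notes on version B (the rewrite author's own statement) =====
-- stated objective: faster
-- what changed: Replaces the sort-then-scan with break/previous sentinel by two direct linear aggregates: max of the dimensions <= 2000, falling back to min of the whole list when none qualifies.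
import Mathlib
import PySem

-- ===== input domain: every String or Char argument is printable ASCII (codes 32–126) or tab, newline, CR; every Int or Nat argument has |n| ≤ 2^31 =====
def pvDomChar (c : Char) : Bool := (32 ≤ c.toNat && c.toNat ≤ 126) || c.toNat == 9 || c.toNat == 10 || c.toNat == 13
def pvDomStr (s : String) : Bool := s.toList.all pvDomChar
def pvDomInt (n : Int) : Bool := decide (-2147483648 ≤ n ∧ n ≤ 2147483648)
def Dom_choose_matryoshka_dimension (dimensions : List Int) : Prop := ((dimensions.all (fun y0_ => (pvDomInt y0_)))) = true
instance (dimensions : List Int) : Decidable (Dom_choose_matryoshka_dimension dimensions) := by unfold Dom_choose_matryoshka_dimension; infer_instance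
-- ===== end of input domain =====

-- B replaces A's sort-then-scan (break + previous sentinel) by two direct aggregates:
-- max of the dimensions ≤ 2000, falling back to min of the whole list: O(n) instead of O(n log n).


-- ===== PORT A =====
-- the for-loop: carries (previous, dimension); stops ('break') at the first element > 2000
def chooseLoopA : List Int → Option Int → Int → (Option Int × Int)
  | [], prev, dim => (prev, dim)
  | d :: rest, prev, _ =>
      if d > 2000 then (prev, d) else chooseLoopA rest (some d) d

def choose_matryoshka_dimension (dimensions : List Int) : Int :=
  -- len(dimensions) == 0 raises ValueError: excluded by Pre_; the initial 0 is never read on Pre_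
  let s := PySem.List.sorted dimensions (fun x => x) false
  let r := chooseLoopA s none 0
  if r.2 > 2000 then
    match r.1 with
    | none => r.2
    | some p => p
  else r.2

-- ===== PORT B =====
def choose_matryoshka_dimension_alt (dimensions : List Int) : Int :=
  -- empty input raises ValueError: excluded by Pre_; the 0 defaults are never reached on Pre_
  let valid := dimensions.filter (fun d => d ≤ 2000)
  if valid ≠ [] then
    match PySem.List.max? valid (fun x => x) with
    | some m => m
    | none => 0
  else
    match PySem.List.min? dimensions (fun x => x) with
    | some m => m
    | none => 0

-- ===== PRECONDITION & SPEC =====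
-- Both A and B raise ValueError on the empty list; Pre_ excludes exactly that input.
def Pre_choose_matryoshka_dimension (dimensions : List Int) : Prop := dimensions ≠ []
instance (dimensions : List Int) : Decidable (Pre_choose_matryoshka_dimension dimensions) := by unfold Pre_choose_matryoshka_dimension; infer_instance
def pvWitness_choose_matryoshka_dimension : List Int := [512, 3000, 1024]

def Spec_choose_matryoshka_dimension (dimensions : List Int) (out : Int) : Prop := out = choose_matryoshka_dimension_alt dimensions
instance (dimensions : List Int) (out : Int) : Decidable (Spec_choose_matryoshka_dimension dimensions out) := by unfold Spec_choose_matryoshka_dimension; infer_instance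

-- ===== CLAIM (what is proved, stated in full; the proofs are below) =====
def Claim_equal_choose_matryoshka_dimension : Prop := ∀ (dimensions : List Int), Dom_choose_matryoshka_dimension dimensions → Pre_choose_matryoshka_dimension dimensions → Spec_choose_matryoshka_dimension dimensions (choose_matryoshka_dimension dimensions)

-- ===== LEMMAS AND PROOFS =====

-- in a nondecreasing list every element is ≤ the last one
theorem le_getLast_of_pairwise {l : List Int} (hp : l.Pairwise (· ≤ ·)) (h : l ≠ []) :
    ∀ x ∈ l, x ≤ l.getLast h := by
  induction l with
  | nil => simp
  | cons a t ih =>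
    rcases List.pairwise_cons.mp hp with ⟨ha, ht⟩
    intro x hx
    cases t with
    | nil =>
      rcases List.mem_cons.mp hx with rfl | hx0
      · simp
      · simp at hx0
    | cons b u =>
      have hne2 : b :: u ≠ [] := by simp
      rw [List.getLast_cons hne2]
      rcases List.mem_cons.mp hx with rfl | hx'
      · exact ha _ (List.getLast_mem hne2)
      · exact ih ht hne2 x hx' 

-- the loop over a nondecreasing list, entered with previous = some prev (prev ≤ 2000):
-- A's post-processing of its result is the last element of prev :: filter (≤ 2000)
theorem loopA_char (s : List Int) (prev : Int) (hprev : prev ≤ 2000)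
    (hp : s.Pairwise (· ≤ ·)) :
    (if (chooseLoopA s (some prev) prev).2 > 2000 then
       (match (chooseLoopA s (some prev) prev).1 with
        | none => (chooseLoopA s (some prev) prev).2
        | some p => p)
     else (chooseLoopA s (some prev) prev).2)
    = (prev :: s.filter (fun d => d ≤ 2000)).getLast (by simp) := by
  induction s generalizing prev with
  | nil => simp [chooseLoopA, not_lt.mpr hprev]
  | cons h t ih =>
    rcases List.pairwise_cons.mp hp with ⟨hh, ht⟩
    by_cases hgt : h > 2000
    · have hfil : (h :: t).filter (fun d => d ≤ 2000) = [] := by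
        rw [List.filter_eq_nil_iff]
        intro x hx
        rcases List.mem_cons.mp hx with rfl | hx'
        · simpa using hgt
        · simpa using lt_of_lt_of_le hgt (hh _ hx')
      simp [chooseLoopA, hgt, hfil]
    · rw [not_lt] at hgt
      have hstep : chooseLoopA (h :: t) (some prev) prev = chooseLoopA t (some h) h := by
        simp [chooseLoopA, not_lt.mpr hgt]
      have hfil : (h :: t).filter (fun d => d ≤ 2000) = h :: t.filter (fun d => d ≤ 2000) := by
        simp [hgt]
      rw [hstep, ih h hgt ht, hfil]
      exact (List.getLast_cons (by simp)).symm

-- ===== VERDICT (by name: the statement is the Claim_ definition above) =====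
theorem choose_matryoshka_dimension_spec : Claim_equal_choose_matryoshka_dimension := by
  intro dims _ hne
  unfold Spec_choose_matryoshka_dimension choose_matryoshka_dimension choose_matryoshka_dimension_alt
  simp only []
  set s := PySem.List.sorted dims (fun x => x) false with hs
  have hperm : s.Perm dims := PySem.List.sorted_perm dims (fun x => x) false
  have hsp : s.Pairwise (· ≤ ·) := by
    simpa [hs] using PySem.List.sorted_pairwise dims (fun x => x)
  have hsne : s ≠ [] := by
    intro h0
    have hp2 := hperm.symm
    rw [h0] at hp2
    exact hne hp2.eq_nil
  obtain ⟨h, t, hst⟩ := List.exists_cons_of_ne_nil hsne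
  have hhd : ∀ y ∈ dims, h ≤ y := by
    have := PySem.List.key_head_sorted_le (xs := dims) (key := fun x => x) (hs ▸ hst)
    simpa using this
  have hhs : h ∈ s := by rw [hst]; exact List.mem_cons_self ..
  have hhmem : h ∈ dims := hperm.mem_iff.mp hhs
  rcases List.pairwise_cons.mp (hst ▸ hsp) with ⟨hh, ht⟩
  by_cases hgt : h > 2000
  · -- every dimension exceeds 2000: the loop breaks at once, B's filter is empty
    have hall : ∀ x ∈ dims, 2000 < x := fun x hx => lt_of_lt_of_le hgt (hhd x hx)
    have hfil : dims.filter (fun d => d ≤ 2000) = [] := by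
      rw [List.filter_eq_nil_iff]; intro x hx; simpa using hall x hx
    have hA : chooseLoopA s none 0 = (none, h) := by
      rw [hst]; simp [chooseLoopA, hgt]
    rw [hA, hfil]
    simp only [if_pos hgt, ne_eq, not_true_eq_false, if_false]
    rcases hmin : PySem.List.min? dims (fun x => x) with _ | m
    · exact absurd ((PySem.List.min?_eq_none_iff dims _).mp hmin) hne
    · have h1 : m ≤ h := by simpa using PySem.List.min?_isMin hmin h hhmem
      have h2 : h ≤ m := hhd m (PySem.List.min?_mem hmin)
      simp [le_antisymm h1 h2]
  · -- some dimension ≤ 2000: both sides are the largest dimension ≤ 2000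
    rw [not_lt] at hgt
    have hstep : chooseLoopA s none 0 = chooseLoopA t (some h) h := by
      rw [hst]; simp [chooseLoopA, not_lt.mpr hgt]
    rw [hstep, loopA_char t h hgt ht]
    set L := dims.filter (fun d => d ≤ 2000) with hL
    have hLperm : (s.filter (fun d => d ≤ 2000)).Perm L := hperm.filter _
    have hhL : h ∈ L := List.mem_filter.mpr ⟨hhmem, by simpa using hgt⟩
    have hLne : L ≠ [] := fun h0 => by simp [h0] at hhL
    have hcons : (h :: t.filter (fun d => d ≤ 2000)) = s.filter (fun d => d ≤ 2000) := by
      rw [hst]; simp [hgt]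
    rw [if_pos hLne]
    rcases hmax : PySem.List.max? L (fun x => x) with _ | m
    · exact absurd ((PySem.List.max?_eq_none_iff L _).mp hmax) hLne
    · have hsf : (s.filter (fun d => d ≤ 2000)).Pairwise (· ≤ ·) := hsp.filter _
      have hgl : (h :: t.filter (fun d => d ≤ 2000)).getLast (by simp) ∈ s.filter (fun d => d ≤ 2000) := by
        rw [← hcons]
        exact List.getLast_mem _
      have h1 : (h :: t.filter (fun d => d ≤ 2000)).getLast (by simp) ≤ m := by
        simpa using PySem.List.max?_isMax hmax _ (hLperm.mem_iff.mp hgl)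
      have h2 : m ≤ (h :: t.filter (fun d => d ≤ 2000)).getLast (by simp) := by
        have hmS : m ∈ s.filter (fun d => d ≤ 2000) :=
          hLperm.mem_iff.mpr (PySem.List.max?_mem hmax)
        have := le_getLast_of_pairwise hsf (fun h0 => by simp [h0] at hmS) m hmS
        have hlast : (s.filter (fun d => d ≤ 2000)).getLast (fun h0 => by simp [h0] at hmS)
            = (h :: t.filter (fun d => d ≤ 2000)).getLast (by simp) := by
          congr 1; exact hcons.symm
        rwa [hlast] at this
      simp [le_antisymm h1 h2]
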